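-- pv_equiv track=rewrite | github.com/ingyuseong/rationale-evaluation | test_decoded_generator.py | get_spans_generative_split
-- ===== SOURCE A (Python) =====
-- def get_spans_generative_split(claim, explanations):
--     spans = []
--
--     claim_tokens = claim.split()
--     claim_tokens_len = len(claim_tokens)
--     explanation_tokens = [token for explanation in explanations for token in explanation.split()]
--     checkpoint = 0
--     is_matched = False
--
--     for j, explanation_token in enumerate(explanation_tokens):
--         for i, claim_token in enumerate(claim_tokens[checkpoint:]):
--
--             if explanation_token == claim_token:
--                 # Matched
--                 if is_matched:
--                     # Middle of the span
--                     spans[-1][1] = checkpoint+i+1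
--                     checkpoint += i+1
--                     break
--                 else:
--                     # Start of the span
--                     spans.append([checkpoint+i, checkpoint+i+1])
--                     is_matched = True
--                     checkpoint += i+1
--                     break
--             else:
--                 # Not Matched
--                 if is_matched:
--                     # End of span
--                     is_matched = False
--                     continue
--
--     return spans
-- ===== SOURCE B (Python) =====
-- def get_spans_generative_split(claim, explanations):
--     claim_tokens = claim.split()
--     # inverted index: token -> list of its positions in the claim (increasing)
--     positions = {}
--     for idx, tok in enumerate(claim_tokens):
--         positions.setdefault(tok, []).append(idx)
--
--     spans = []
--     checkpoint = 0
--     matched = False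
--     for explanation in explanations:
--         for tok in explanation.split():
--             k = next((x for x in positions.get(tok, []) if x >= checkpoint), None)
--             if k is None:
--                 matched = False
--             elif matched and k == checkpoint:
--                 spans[-1][1] = k + 1
--                 checkpoint = k + 1
--             else:
--                 spans.append([k, k + 1])
--                 matched = True
--                 checkpoint = k + 1
--     return spans
-- ===== Notes on version B (the rewrite author's own statement) =====
-- stated objective: alternative
-- what changed: B precomputes an inverted index (token -> list of its claim positions) once and finds each explanation token's first position >= checkpoint in that token's own occurrence list, instead of A's rescan of the claim token tail (with the is_matched flag reset inside the scan) for every explanation token.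
import Mathlib
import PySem

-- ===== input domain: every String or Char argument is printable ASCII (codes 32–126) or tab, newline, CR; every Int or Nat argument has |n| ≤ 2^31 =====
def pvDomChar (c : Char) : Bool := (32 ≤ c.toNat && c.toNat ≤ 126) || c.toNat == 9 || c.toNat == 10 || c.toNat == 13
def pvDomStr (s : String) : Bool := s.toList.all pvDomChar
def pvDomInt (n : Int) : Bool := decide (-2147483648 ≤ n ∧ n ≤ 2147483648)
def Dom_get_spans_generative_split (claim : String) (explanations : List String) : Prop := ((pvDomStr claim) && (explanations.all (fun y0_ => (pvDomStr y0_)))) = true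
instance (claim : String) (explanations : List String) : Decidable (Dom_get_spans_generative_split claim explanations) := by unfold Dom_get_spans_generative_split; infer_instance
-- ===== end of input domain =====

-- B replaces A's per-token rescan of the claim by an inverted index (token → positions), looking up
-- the first position ≥ checkpoint in the token's own occurrence list; same return value, built once.

-- ===== PORT A =====
-- spans[-1][1] = v  (in both Pythons this runs only with spans nonempty and the last span a 2-list,
-- where List.set at index 1 is exact; on [] Python would raise, which is unreachable)
def pvSetLast1 (spans : List (List Int)) (v : Int) : List (List Int) :=
  match spans with
  | [] => []
  | [s] => [s.set 1 v]
  | s :: rest => s :: pvSetLast1 rest v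

-- inner loop: 'for i, claim_token in enumerate(claim_tokens[checkpoint:])' with its breaks/continues
def pvAInner (tok : String) : List String → List (List Int) → Int → Int → Bool → List (List Int) × Int × Bool
  | [], spans, c, _, m => (spans, c, m)
  | t :: rest, spans, c, i, m =>
    if tok == t then
      if m then (pvSetLast1 spans (c + i + 1), c + i + 1, m)
      else (spans ++ [[c + i, c + i + 1]], c + i + 1, true)
    else
      pvAInner tok rest spans c (i + 1) (if m then false else m)

-- outer loop: 'for j, explanation_token in enumerate(explanation_tokens)' (j is unused in the body)
def pvAOuter (cts : List String) : List String → List (List Int) → Int → Bool → List (List Int) × Int × Bool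
  | [], spans, c, m => (spans, c, m)
  | tok :: rest, spans, c, m =>
    let st := pvAInner tok (PySem.List.slice cts (some c) none) spans c 0 m
    pvAOuter cts rest st.1 st.2.1 st.2.2

def get_spans_generative_split (claim : String) (explanations : List String) : List (List Int) :=
  let claim_tokens := PySem.Str.split₀ claim
  let explanation_tokens := explanations.flatMap (fun e => PySem.Str.split₀ e)
  (pvAOuter claim_tokens explanation_tokens [] 0 false).1

-- ===== PORT B =====
-- 'positions = {}; for idx, tok in enumerate(claim_tokens): positions.setdefault(tok, []).append(idx)'
def pvPositions (cts : List String) : PySem.Dict String (List Int) :=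
  (PySem.List.enumerate cts 0).foldl (fun d p => d.modify p.2 [] (fun l => l ++ [p.1])) PySem.Dict.empty

-- 'for tok in explanation.split(): ...' body of B
def pvBLoop (pos : PySem.Dict String (List Int)) : List String → List (List Int) → Int → Bool → List (List Int) × Int × Bool
  | [], spans, c, m => (spans, c, m)
  | tok :: rest, spans, c, m =>
    match (PySem.Dict.getD pos tok []).find? (fun x => decide (c ≤ x)) with
    | none => pvBLoop pos rest spans c false
    | some k =>
      if m && (k == c) then pvBLoop pos rest (pvSetLast1 spans (k + 1)) (k + 1) m
      else pvBLoop pos rest (spans ++ [[k, k + 1]]) (k + 1) true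

def get_spans_generative_split_alt (claim : String) (explanations : List String) : List (List Int) :=
  let claim_tokens := PySem.Str.split₀ claim
  let positions := pvPositions claim_tokens
  (explanations.foldl (fun st e => pvBLoop positions (PySem.Str.split₀ e) st.1 st.2.1 st.2.2)
    (([] : List (List Int)), (0 : Int), false)).1

-- ===== PRECONDITION & SPEC =====
def Spec_get_spans_generative_split (claim : String) (explanations : List String) (out : List (List Int)) : Prop := out = get_spans_generative_split_alt claim explanations
instance (claim : String) (explanations : List String) (out : List (List Int)) : Decidable (Spec_get_spans_generative_split claim explanations out) := by unfold Spec_get_spans_generative_split; infer_instance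

-- ===== CLAIM (what is proved, stated in full; the proofs are below) =====
def Claim_equal_get_spans_generative_split : Prop := ∀ (claim : String) (explanations : List String), Dom_get_spans_generative_split claim explanations → Spec_get_spans_generative_split claim explanations (get_spans_generative_split claim explanations)

-- ===== LEMMAS AND PROOFS =====

-- reference list of the positions (from offset a) at which `tok` occurs
def pvOccs (tok : String) : List String → Int → List Int
  | [], _ => []
  | t :: r, a => (if tok == t then [a] else []) ++ pvOccs tok r (a + 1)

-- one step of either loop, as a function of the first matching position at/after the checkpoint
def pvStep (spans : List (List Int)) (c a : Int) (m emp : Bool) (k? : Option Int) : List (List Int) × Int × Bool :=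
  match k? with
  | none => (spans, c, m && emp)
  | some k =>
    if m && (k == a) then (pvSetLast1 spans (k + 1), k + 1, m)
    else (spans ++ [[k, k + 1]], k + 1, true)

theorem pvOccs_mem_bounds (tok : String) : ∀ (ts : List String) (a x : Int),
    x ∈ pvOccs tok ts a → a ≤ x ∧ x < a + ts.length := by
  intro ts
  induction ts with
  | nil => intro a x h; simp [pvOccs] at h
  | cons t r ih =>
    intro a x h
    simp only [pvOccs, List.mem_append] at h
    have hlen : ((t :: r).length : Int) = (r.length : Int) + 1 := by simp
    rcases h with h | h
    · have hx : x = a := by split at h <;> simp_all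
      subst hx; constructor
      · exact le_rfl
      · rw [hlen]; have : (0:Int) ≤ r.length := by positivity
        omega
    · have := ih (a + 1) x h
      rw [hlen]; omega

theorem pvAInner_spec (tok : String) : ∀ (ts : List String) (spans : List (List Int)) (c i : Int) (m : Bool),
    pvAInner tok ts spans c i m = pvStep spans c (c + i) m ts.isEmpty (pvOccs tok ts (c + i)).head? := by
  intro ts
  induction ts with
  | nil =>
    intro spans c i m
    simp [pvAInner, pvOccs, pvStep]
  | cons t r ih =>
    intro spans c i m
    by_cases h : tok = t
    · cases m <;> simp [pvAInner, pvOccs, pvStep, h]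
    · have hb : (tok == t) = false := by simp [h]
      have hm : (if m then false else m) = false := by cases m <;> rfl
      simp only [pvAInner, hb, Bool.false_eq_true, if_false, hm]
      rw [ih spans c (i + 1) false]
      have hocc : pvOccs tok (t :: r) (c + i) = pvOccs tok r (c + i + 1) := by
        simp [pvOccs, hb]
      rw [hocc]
      have harith : c + (i + 1) = c + i + 1 := by ring
      rw [harith]
      rcases hh : (pvOccs tok r (c + i + 1)).head? with _ | k
      · simp [pvStep]
      · have hkmem : k ∈ pvOccs tok r (c + i + 1) := List.mem_of_mem_head? (by rw [hh]; rfl)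
        have hkb := pvOccs_mem_bounds tok r (c + i + 1) k hkmem
        have hkne : (k == c + i) = false := by
          simp only [beq_eq_false_iff_ne, ne_eq]
          omega
        simp [pvStep, hkne]

theorem pvOccs_filter_ge (tok : String) : ∀ (ts : List String) (nn : Nat) (a : Int),
    (pvOccs tok ts a).filter (fun x => decide (a + (nn : Int) ≤ x)) = pvOccs tok (ts.drop nn) (a + (nn : Int)) := by
  intro ts
  induction ts with
  | nil => intro nn a; simp [pvOccs]
  | cons t r ih =>
    intro nn a
    cases nn with
    | zero =>
      simp only [Nat.cast_zero, add_zero, List.drop_zero]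
      apply List.filter_eq_self.mpr
      intro x hx
      have := pvOccs_mem_bounds tok (t :: r) a x hx
      simp; omega
    | succ n =>
      have hhead : (if tok == t then [a] else []).filter (fun x => decide (a + ((n + 1 : Nat) : Int) ≤ x)) = [] := by
        split
        · simp
        · simp
      have harith : a + ((n + 1 : Nat) : Int) = (a + 1) + (n : Int) := by push_cast; ring
      simp only [pvOccs, List.filter_append, hhead, List.nil_append, List.drop_succ_cons]
      rw [harith]
      have := ih n (a + 1)
      convert this using 2

theorem pvPositions_getD_aux (tok : String) : ∀ (cts : List String) (s : Int),
    (((PySem.List.enumerate cts s).map Prod.swap).filter (fun p => p.1 == tok)).map (fun p => p.2)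
      = pvOccs tok cts s := by
  intro cts
  induction cts with
  | nil => intro s; simp [pvOccs, PySem.List.enumerate_nil]
  | cons t r ih =>
    intro s
    rw [PySem.List.enumerate_cons]
    by_cases h : tok = t
    · subst h
      simp [pvOccs, ih]
    · have h1 : (t == tok) = false := by simp [Ne.symm h]
      have h2 : (tok == t) = false := by simp [h]
      simp [pvOccs, h1, h2, ih]

theorem pvPositions_getD (cts : List String) (tok : String) :
    (pvPositions cts).getD tok [] = pvOccs tok cts 0 := by
  unfold pvPositions
  have hmap : (PySem.List.enumerate cts 0).foldl (fun d p => d.modify p.2 [] (fun l => l ++ [p.1])) PySem.Dict.empty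
      = ((PySem.List.enumerate cts 0).map Prod.swap).foldl (fun d p => d.modify p.1 [] (fun l => l ++ [p.2])) PySem.Dict.empty := by
    rw [List.foldl_map]
    rfl
  rw [hmap, PySem.Dict.getD_foldl_modify_append]
  rw [pvPositions_getD_aux]
  rfl

theorem pvLoop_eq (cts : List String) : ∀ (ts : List String) (spans : List (List Int)) (c : Int) (mA mB : Bool),
    0 ≤ c → c ≤ (cts.length : Int) → (c < (cts.length : Int) → mA = mB) →
    (pvAOuter cts ts spans c mA).1 = (pvBLoop (pvPositions cts) ts spans c mB).1 := by
  intro ts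
  induction ts with
  | nil => intro spans c mA mB _ _ _; rfl
  | cons tok rest ih =>
    intro spans c mA mB hc0 hcn hm
    -- both sides look at the same "first position ≥ c of tok"
    have hslice : PySem.List.slice cts (some c) none = cts.drop c.toNat :=
      PySem.List.slice_from cts hc0
    have hcast : (0 : Int) + (c.toNat : Int) = c := by omega
    have hfilter : (pvOccs tok cts 0).filter (fun x => decide (c ≤ x)) = pvOccs tok (cts.drop c.toNat) c := by
      have := pvOccs_filter_ge tok cts c.toNat 0
      rw [hcast] at this
      exact this
    have hfind : (PySem.Dict.getD (pvPositions cts) tok []).find? (fun x => decide (c ≤ x))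
        = (pvOccs tok (cts.drop c.toNat) c).head? := by
      rw [pvPositions_getD, ← List.head?_filter, hfilter]
    have hA : pvAInner tok (PySem.List.slice cts (some c) none) spans c 0 mA
        = pvStep spans c c mA (cts.drop c.toNat).isEmpty (pvOccs tok (cts.drop c.toNat) c).head? := by
      rw [hslice]
      have := pvAInner_spec tok (cts.drop c.toNat) spans c 0 mA
      simpa using this
    simp only [pvAOuter, pvBLoop, hfind]
    rcases hh : (pvOccs tok (cts.drop c.toNat) c).head? with _ | k
    · -- no occurrence of tok at or after c
      rw [hA, hh]
      by_cases hlt : c < (cts.length : Int)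
      · have hne : (cts.drop c.toNat).isEmpty = false := by
          rw [List.isEmpty_eq_false_iff, ← List.length_pos_iff, List.length_drop]
          omega
        simp only [pvStep, hne, Bool.and_false]
        exact ih spans c false false hc0 hcn (fun _ => rfl)
      · have hemp : (cts.drop c.toNat).isEmpty = true := by
          rw [List.isEmpty_iff, List.drop_eq_nil_iff]
          omega
        simp only [pvStep, hemp, Bool.and_true]
        exact ih spans c mA false hc0 hcn (fun h => absurd h hlt)
    · -- first occurrence k, with c ≤ k < length
      have hkmem : k ∈ pvOccs tok (cts.drop c.toNat) c := List.mem_of_mem_head? (by rw [hh]; rfl)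
      have hkb := pvOccs_mem_bounds tok (cts.drop c.toNat) c k hkmem
      have hklen : k < (cts.length : Int) := by
        have := hkb.2
        rw [List.length_drop] at this
        omega
      have hmm : mA = mB := hm (lt_of_le_of_lt hkb.1 hklen)
      rw [hA, hh]
      subst hmm
      simp only [pvStep]
      by_cases hcond : (mA && (k == c)) = true
      · simp only [hcond]
        exact ih (pvSetLast1 spans (k + 1)) (k + 1) mA mA (by omega) (by omega) (fun _ => rfl)
      · rw [Bool.not_eq_true] at hcond
        simp only [hcond, Bool.false_eq_true, if_false]
        exact ih (spans ++ [[k, k + 1]]) (k + 1) true true (by omega) (by omega) (fun _ => rfl)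

theorem pvBLoop_append (pos : PySem.Dict String (List Int)) : ∀ (xs ys : List String) (spans : List (List Int)) (c : Int) (m : Bool),
    pvBLoop pos (xs ++ ys) spans c m
      = (fun st : List (List Int) × Int × Bool => pvBLoop pos ys st.1 st.2.1 st.2.2) (pvBLoop pos xs spans c m) := by
  intro xs
  induction xs with
  | nil => intro ys spans c m; rfl
  | cons tok rest ih =>
    intro ys spans c m
    simp only [List.cons_append, pvBLoop]
    rcases (PySem.Dict.getD pos tok []).find? (fun x => decide (c ≤ x)) with _ | k
    · exact ih ys spans c false
    · by_cases hcond : (m && (k == c)) = true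
      · simp only [hcond]; exact ih ys _ _ _
      · rw [Bool.not_eq_true] at hcond
        simp only [hcond, Bool.false_eq_true, if_false]; exact ih ys _ _ _

theorem pvBLoop_flat (pos : PySem.Dict String (List Int)) : ∀ (es : List String) (spans : List (List Int)) (c : Int) (m : Bool),
    es.foldl (fun st e => pvBLoop pos (PySem.Str.split₀ e) st.1 st.2.1 st.2.2) (spans, c, m)
      = pvBLoop pos (es.flatMap (fun e => PySem.Str.split₀ e)) spans c m := by
  intro es
  induction es with
  | nil => intro spans c m; rfl
  | cons e rest ih =>
    intro spans c m
    rw [List.foldl_cons, List.flatMap_cons, pvBLoop_append]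
    rcases pvBLoop pos (PySem.Str.split₀ e) spans c m with ⟨s', c', m'⟩
    exact ih s' c' m'

-- ===== VERDICT (by name: the statement is the Claim_ definition above) =====
theorem get_spans_generative_split_spec : Claim_equal_get_spans_generative_split := by
  intro claim explanations _
  unfold Spec_get_spans_generative_split get_spans_generative_split get_spans_generative_split_alt
  simp only []
  rw [pvBLoop_flat]
  exact pvLoop_eq _ _ _ 0 false false le_rfl (by positivity) (fun _ => rfl)
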